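-- pv_equiv track=rewrite | github.com/mohamedlandolsi/gtm-intelligence-platform | data_sources/stripe_technical_signals.py | _get_date_range
-- ===== SOURCE A (Python) =====
-- from typing import List, Dict, Optional
--
-- def _get_date_range(signals: List[Dict]) -> Dict[str, str]:
--     """Get date range of signals"""
--     dates = [signal.get('date') for signal in signals if signal.get('date')]
--
--     if not dates:
--         return {'earliest': None, 'latest': None}
--
--     return {
--         'earliest': min(dates),
--         'latest': max(dates)
--     }
-- ===== SOURCE B (Python) =====
-- from typing import List, Dict, Optional
--
-- def _get_date_range(signals: List[Dict]) -> Dict[str, str]: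
--     """Get date range of signals (single pass, no intermediate list)"""
--     bounds = None
--     for sig in signals:
--         d = sig.get('date')
--         if not d:
--             continue
--         if bounds is None:
--             bounds = (d, d)
--         else:
--             e, l = bounds
--             bounds = (d if d < e else e, d if l < d else l)
--     if bounds is None:
--         return {'earliest': None, 'latest': None}
--     return {'earliest': bounds[0], 'latest': bounds[1]}
-- ===== Notes on version B (the rewrite author's own statement) =====
-- stated objective: alternative
-- what changed: Replaced the comprehension that materialises all dates plus separate min() and max() passes with a single fold over the signals that threads an optional (earliest, latest) pair, never building the dates list.
import Mathlib
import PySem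

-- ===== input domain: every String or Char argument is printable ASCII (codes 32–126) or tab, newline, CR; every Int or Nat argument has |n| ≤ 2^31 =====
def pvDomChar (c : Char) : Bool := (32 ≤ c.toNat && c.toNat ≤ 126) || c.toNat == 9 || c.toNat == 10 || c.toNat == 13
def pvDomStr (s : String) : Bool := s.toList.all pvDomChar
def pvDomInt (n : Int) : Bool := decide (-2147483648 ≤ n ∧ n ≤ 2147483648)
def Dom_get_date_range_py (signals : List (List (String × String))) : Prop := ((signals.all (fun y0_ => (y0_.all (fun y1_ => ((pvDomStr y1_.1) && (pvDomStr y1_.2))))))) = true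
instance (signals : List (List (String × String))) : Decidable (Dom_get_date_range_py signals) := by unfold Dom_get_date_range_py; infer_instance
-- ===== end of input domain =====

-- B differs only in structure (one fold instead of list + min + max); return values are identical.

-- shared helper: signal.get('date') restricted to truthy (non-empty) values
def pvGetDate (sig : List (String × String)) : Option String :=
  match (PySem.Dict.ofList sig).get? "date" with
  | some d => if d = "" then none else some d
  | none => none

-- ===== PORT A =====
-- dates = [signal.get('date') for signal in signals if signal.get('date')]; then min/max
def get_date_range_py (signals : List (List (String × String))) : List (String × Option String) :=
  let dates := signals.foldl (fun acc sig =>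
    match pvGetDate sig with
    | some d => acc ++ [d]
    | none => acc) []
  if dates = [] then
    [("earliest", none), ("latest", none)]
  else
    [("earliest", PySem.List.min? dates (fun x => x)),
     ("latest", PySem.List.max? dates (fun x => x))]

-- ===== PORT B =====
-- one pass threading an optional (earliest, latest) pair
def pvStepB (st : Option (String × String)) (sig : List (String × String)) :
    Option (String × String) :=
  match pvGetDate sig with
  | none => st
  | some d =>
    match st with
    | none => some (d, d)
    | some (e, l) => some ((if d < e then d else e), (if l < d then d else l))

def get_date_range_py_alt (signals : List (List (String × String))) : List (String × Option String) :=
  match signals.foldl pvStepB none with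
  | none => [("earliest", none), ("latest", none)]
  | some (e, l) => [("earliest", some e), ("latest", some l)]

-- ===== PRECONDITION & SPEC =====
def Spec_get_date_range_py (signals : List (List (String × String))) (out : List (String × Option String)) : Prop := out = get_date_range_py_alt signals
instance (signals : List (List (String × String))) (out : List (String × Option String)) : Decidable (Spec_get_date_range_py signals out) := by unfold Spec_get_date_range_py; infer_instance

-- ===== CLAIM (what is proved, stated in full; the proofs are below) =====
def Claim_equal_get_date_range_py : Prop := ∀ (signals : List (List (String × String))), Dom_get_date_range_py signals → Spec_get_date_range_py signals (get_date_range_py signals)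

-- ===== LEMMAS AND PROOFS =====

-- A's date-collecting loop is filterMap pvGetDate
theorem pv_dates_eq (signals : List (List (String × String))) (acc : List String) :
    signals.foldl (fun acc sig =>
      match pvGetDate sig with
      | some d => acc ++ [d]
      | none => acc) acc = acc ++ signals.filterMap pvGetDate := by
  induction signals generalizing acc with
  | nil => simp
  | cons s t ih =>
    simp only [List.foldl_cons, List.filterMap_cons]
    cases h : pvGetDate s <;> simp [ih]

-- the per-date step of B
def pvStepD (st : Option (String × String)) (d : String) : Option (String × String) :=
  match st with
  | none => some (d, d)
  | some (e, l) => some ((if d < e then d else e), (if l < d then d else l))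

-- B's fold over signals collapses to a fold over the extracted dates
theorem pv_foldB_eq (signals : List (List (String × String))) (st : Option (String × String)) :
    signals.foldl pvStepB st = (signals.filterMap pvGetDate).foldl pvStepD st := by
  induction signals generalizing st with
  | nil => rfl
  | cons s t ih =>
    simp only [List.foldl_cons, List.filterMap_cons]
    cases h : pvGetDate s with
    | none => simp [pvStepB, h, ih]
    | some d => simp [pvStepB, pvStepD, h, ih]

-- 'd if d < e else e' is min, 'd if l < d else l' is max
theorem pv_if_min (a b : String) : (if b < a then b else a) = min a b := by
  by_cases h : b < a
  · rw [min_eq_right h.le, if_pos h]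
  · rw [min_eq_left (not_lt.mp h), if_neg h]

theorem pv_if_max (a b : String) : (if a < b then b else a) = max a b := by
  by_cases h : a < b
  · rw [max_eq_right h.le, if_pos h]
  · rw [max_eq_left (not_lt.mp h), if_neg h]

-- the date fold from a seeded state is the running min / running max
theorem pv_foldD_some (ds : List String) (e l : String) :
    ds.foldl pvStepD (some (e, l)) = some (ds.foldl min e, ds.foldl max l) := by
  induction ds generalizing e l with
  | nil => rfl
  | cons d t ih =>
    simp only [List.foldl_cons, pvStepD]
    rw [pv_if_min, pv_if_max, ih]

-- ===== VERDICT (by name: the statement is the Claim_ definition above) =====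
theorem get_date_range_py_spec : Claim_equal_get_date_range_py := by
  intro signals _
  unfold Spec_get_date_range_py get_date_range_py get_date_range_py_alt
  rw [pv_foldB_eq, pv_dates_eq]
  simp only [List.nil_append]
  cases h : signals.filterMap pvGetDate with
  | nil => simp
  | cons d t =>
    simp only [List.foldl_cons]
    have hs : pvStepD none d = some (d, d) := rfl
    rw [hs, pv_foldD_some]
    simp [PySem.List.min?_id_cons, PySem.List.max?_id_cons]
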